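/- GENERATED by mk_final_copies.py from the proof of the farm's unit `decode_residue.6bb` (farm:decode_residue.6bb.1: Proof.lean) as the
   re-elaboration sweep compiled it — do not edit. -/
import Vorbis.Spec.Units.decode_residue_6bb
import Vorbis.Spec.Worked.decode_residue_6bb_Lemmas

open X86 X86.User Asan Vorbis Vorbis.Spec Vorbis.Spec.DecodeResidue

/-- Unit `decode_residue.6bb`: THE CALL ARM of the i-loop 2229 of decode_residue (`ch > 2`), from `AtCall6` (0x10f4ed, `b ≥ 0` in ebx) through
the call of codebook_decode_deinterleave_repeat to the loop head with `(i + 1, pcount + 1)` (result 1) or to `done:` (result 0):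
`call_arm` of Lemmas.lean, with the callee's contract for the live lists inside the function (`g.others'`, `g.frames'`, `g.Blk`, `g.len`). -/
theorem Vorbis.Spec.Worked.decode_residue_6bb_ok : Vorbis.Spec.decode_residue_6bb.Statement := by
  intro Lay hLay μ hμ u₀ hcode h_load8 h_deint
  intro g hent pass cs i pcount b v hat
  exact Vorbis.Spec.decode_residue_6bb.call_arm hLay hμ hcode h_load8 (h_deint g.others' g.frames' g.Blk g.len) hent pass cs i pcount b v hat
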